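-- pv_equiv track=rewrite | github.com/JourdanL/pararev | cript_extract_parags_from_casimir.py | recollage_sentence
-- ===== SOURCE A (Python) =====
-- def recollage_sentence(sentence):
--     end_with_space=True
--     sentence_complet=""
--     for ligne in sentence:
--         if len(ligne)>0:
--             start_with_space=(ligne[0]==' ')
--             if end_with_space or start_with_space:
--                 sentence_complet+=ligne
--             else:
--                 sentence_complet+=' '
--                 sentence_complet+=ligne
--             end_with_space=(ligne[-1]==' ')
--     return  sentence_complet
-- ===== SOURCE B (Python) =====
-- def _reduce(parts):
--     if len(parts) == 1:
--         return parts[0]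
--     mid = len(parts) // 2
--     left = _reduce(parts[:mid])
--     right = _reduce(parts[mid:])
--     if left.endswith(' ') or right.startswith(' '):
--         return left + right
--     return left + ' ' + right
--
-- def recollage_sentence(sentence):
--     parts = [l for l in sentence if len(l) > 0]
--     if not parts:
--         return ""
--     return _reduce(parts)
-- ===== Notes on version B (the rewrite author's own statement) =====
-- stated objective: alternative
-- what changed: Replaces A's single left-to-right pass with a carried end_with_space flag by a divide-and-conquer reduction: nonempty lines are filtered once, then the list is split in halves recursively and the two joined halves are glued with a space unless the left half ends or the right half starts with a space; correct because that glue operation is associative (it preserves the first and last characters of its arguments).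
import Mathlib
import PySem

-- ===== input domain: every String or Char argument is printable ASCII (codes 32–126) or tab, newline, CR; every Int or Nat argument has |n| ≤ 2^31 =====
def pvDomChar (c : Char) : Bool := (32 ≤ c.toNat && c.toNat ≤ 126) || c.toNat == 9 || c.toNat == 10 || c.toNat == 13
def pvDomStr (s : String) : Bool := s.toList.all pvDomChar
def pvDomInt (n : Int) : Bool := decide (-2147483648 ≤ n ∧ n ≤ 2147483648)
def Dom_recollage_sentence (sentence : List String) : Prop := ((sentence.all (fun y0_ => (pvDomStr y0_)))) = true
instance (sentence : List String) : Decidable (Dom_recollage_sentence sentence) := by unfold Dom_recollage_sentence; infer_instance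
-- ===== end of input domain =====

-- B replaces A's single pass with a carried end_with_space flag by a divide-and-conquer
-- reduction over the filtered nonempty lines (objective: alternative; glue is associative).

-- ===== PORT A =====
-- A's loop body, on code-point lists; state = (end_with_space, sentence_complet)
def recAStep (st : Bool × List Char) (ligne : List Char) : Bool × List Char :=
  if ligne.length > 0 then
    let start_with_space := PySem.List.pyGet? ligne 0 == some ' '
    let acc := if st.1 || start_with_space then st.2 ++ ligne else (st.2 ++ [' ']) ++ ligne
    (PySem.List.pyGet? ligne (-1) == some ' ', acc)
  else st

def recollage_sentence (sentence : List String) : String :=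
  String.ofList ((sentence.map String.toList).foldl recAStep (true, [])).2

-- ===== PORT B =====
-- _reduce's glue of the two reduced halves
def recBGlue (left right : List Char) : List Char :=
  if PySem.Chars.endswith left [' '] || PySem.Chars.startswith right [' '] then left ++ right
  else left ++ ' ' :: right

-- _reduce: split the list of parts in halves, reduce each, glue
def recBReduce (parts : List (List Char)) : List Char :=
  match parts with
  | [] => []
  | [p] => p
  | p :: q :: rest =>
    let mid := (p :: q :: rest).length / 2
    recBGlue (recBReduce ((p :: q :: rest).take mid)) (recBReduce ((p :: q :: rest).drop mid))
termination_by parts.length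
decreasing_by
  · simp; omega
  · simp; omega

def recollage_sentence_alt (sentence : List String) : String :=
  let parts := (sentence.map String.toList).filter (fun l => l.length > 0)
  match parts with
  | [] => ""
  | _ => String.ofList (recBReduce parts)

-- ===== PRECONDITION & SPEC =====
def Spec_recollage_sentence (sentence : List String) (out : String) : Prop := out = recollage_sentence_alt sentence
instance (sentence : List String) (out : String) : Decidable (Spec_recollage_sentence sentence out) := by unfold Spec_recollage_sentence; infer_instance

-- ===== CLAIM (what is proved, stated in full; the proofs are below) =====
def Claim_equal_recollage_sentence : Prop := ∀ (sentence : List String), Dom_recollage_sentence sentence → Spec_recollage_sentence sentence (recollage_sentence sentence)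

-- ===== LEMMAS AND PROOFS =====

-- bridge: on a nonempty line, A's indexed tests equal startswith/endswith
theorem sws_eq (l : List Char) (h : l ≠ []) :
    (PySem.List.pyGet? l 0 == some ' ') = PySem.Chars.startswith l [' '] := by
  cases l with
  | nil => exact absurd rfl h
  | cons c cs => simp [PySem.Chars.startswith, List.isPrefixOf, eq_comm]

theorem ews_eq (l : List Char) (h : l ≠ []) :
    (PySem.List.pyGet? l (-1) == some ' ') = PySem.Chars.endswith l [' '] := by
  rcases List.eq_nil_or_concat l with rfl | ⟨ys, y, rfl⟩
  · exact absurd rfl h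
  · rw [PySem.List.pyGet?_neg_one]
    by_cases hy : y = ' '
    · subst hy
      have h2 : PySem.Chars.endswith (ys.concat ' ') [' '] = true :=
        (PySem.Chars.endswith_iff _ _).mpr ⟨ys, by simp⟩
      simp only [List.concat_eq_append] at h2
      simp [h2]
    · have h2 : PySem.Chars.endswith (ys.concat y) [' '] = false := by
        rw [Bool.eq_false_iff]
        intro hc
        obtain ⟨t, ht⟩ := (PySem.Chars.endswith_iff _ _).mp hc
        have h3 := congrArg List.getLast? ht
        simp [List.concat_eq_append] at h3
        exact hy h3.symm
      simp only [List.concat_eq_append] at h2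
      simp [h2, hy]

theorem glue_ne_nil (x y : List Char) (hx : x ≠ []) : recBGlue x y ≠ [] := by
  unfold recBGlue; split <;> simp [hx]

theorem sws_glue (x y : List Char) (hx : x ≠ []) :
    PySem.Chars.startswith (recBGlue x y) [' '] = PySem.Chars.startswith x [' '] := by
  cases x with
  | nil => exact absurd rfl hx
  | cons c cs =>
    unfold recBGlue
    split <;> simp [PySem.Chars.startswith, List.isPrefixOf]

-- the trailing-space test only looks at the (nonempty) right part
theorem ews_append (z y : List Char) (hy : y ≠ []) :
    PySem.Chars.endswith (z ++ y) [' '] = PySem.Chars.endswith y [' '] := by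
  rcases List.eq_nil_or_concat y with rfl | ⟨ys, c, rfl⟩
  · exact absurd rfl hy
  · simp only [List.concat_eq_append]
    by_cases hc : c = ' '
    · subst hc
      rw [(PySem.Chars.endswith_iff _ _).mpr ⟨z ++ ys, by simp⟩,
          (PySem.Chars.endswith_iff _ _).mpr ⟨ys, by simp⟩]
    · have f : ∀ w : List Char, PySem.Chars.endswith (w ++ [c]) [' '] = false := by
        intro w
        rw [Bool.eq_false_iff]
        intro hcc
        obtain ⟨t, ht⟩ := (PySem.Chars.endswith_iff _ _).mp hcc
        have h3 := congrArg List.getLast? ht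
        simp at h3
        exact hc h3.symm
      rw [show z ++ (ys ++ [c]) = (z ++ ys) ++ [c] by simp, f, f]

theorem ews_glue (x y : List Char) (hy : y ≠ []) :
    PySem.Chars.endswith (recBGlue x y) [' '] = PySem.Chars.endswith y [' '] := by
  unfold recBGlue
  split
  · exact ews_append x y hy
  · rw [show x ++ ' ' :: y = (x ++ [' ']) ++ y by simp]
    exact ews_append _ y hy

theorem glue_assoc (x y z : List Char) (hy : y ≠ []) :
    recBGlue (recBGlue x y) z = recBGlue x (recBGlue y z) := by
  have h1 := ews_glue x y hy
  have h2 := sws_glue y z hy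
  unfold recBGlue at *
  by_cases e1 : PySem.Chars.endswith x [' '] = true <;>
    by_cases e2 : PySem.Chars.endswith y [' '] = true <;>
      by_cases e3 : PySem.Chars.startswith y [' '] = true <;>
        by_cases e4 : PySem.Chars.startswith z [' '] = true <;>
          simp_all

theorem glue_foldl (w b : List Char) (ys : List (List Char)) (hb : b ≠ [])
    (hys : ∀ l ∈ ys, l ≠ []) :
    recBGlue w (ys.foldl recBGlue b) = ys.foldl recBGlue (recBGlue w b) := by
  induction ys generalizing b with
  | nil => rfl
  | cons y ys ih =>
    have hy : y ≠ [] := hys y (by simp)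
    simp only [List.foldl_cons]
    rw [ih (recBGlue b y) (glue_ne_nil b y hb) (fun l hl => hys l (by simp [hl])),
        glue_assoc w b y hb]

-- proof-side view of a left-to-right glue of a whole list
def fgGlue : List (List Char) → List Char
  | [] => []
  | p :: rest => rest.foldl recBGlue p

theorem fgGlue_append (xs ys : List (List Char)) (hxs : xs ≠ []) (hys : ys ≠ [])
    (hall : ∀ l ∈ ys, l ≠ []) :
    fgGlue (xs ++ ys) = recBGlue (fgGlue xs) (fgGlue ys) := by
  match xs, hxs, ys, hys with
  | h :: t, _, b :: r, _ =>
    have hb : b ≠ [] := hall b (by simp)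
    have hr : ∀ l ∈ r, l ≠ [] := fun l hl => hall l (by simp [hl])
    show ((t ++ b :: r).foldl recBGlue h) = recBGlue (t.foldl recBGlue h) (r.foldl recBGlue b)
    rw [List.foldl_append, List.foldl_cons, glue_foldl _ _ _ hb hr]

-- the divide-and-conquer reduce agrees with the left-to-right glue
theorem reduce_eq_fg (parts : List (List Char)) (hall : ∀ l ∈ parts, l ≠ []) :
    recBReduce parts = fgGlue parts := by
  induction hlen : parts.length using Nat.strong_induction_on generalizing parts with
  | _ n ih =>
    match parts with
    | [] => rw [recBReduce]; rfl
    | [p] => rw [recBReduce]; rfl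
    | p :: q :: rest =>
      rw [recBReduce]
      set full := p :: q :: rest with hfull
      set mid := full.length / 2 with hmid
      have hlen2 : full.length ≥ 2 := by simp [hfull]
      have hmid1 : 1 ≤ mid := by omega
      have hmidlt : mid < full.length := by omega
      have htlen : (full.take mid).length = mid := by simp [List.length_take]; omega
      have hdlen : (full.drop mid).length = full.length - mid := by simp
      have htne : full.take mid ≠ [] := by
        intro hc; rw [hc] at htlen; simp at htlen; omega
      have hdne : full.drop mid ≠ [] := by
        intro hc; rw [hc] at hdlen; simp at hdlen; omega
      have htall : ∀ l ∈ full.take mid, l ≠ [] := fun l hl => hall l (List.mem_of_mem_take hl)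
      have hdall : ∀ l ∈ full.drop mid, l ≠ [] := fun l hl => hall l (List.mem_of_mem_drop hl)
      rw [ih (full.take mid).length (by omega) _ htall rfl,
          ih (full.drop mid).length (by rw [hdlen]; omega) _ hdall rfl,
          ← fgGlue_append _ _ htne hdne hdall, List.take_append_drop]
-- A's filter step: empty lines are skipped, so folding over the filtered list is the same
theorem filter_fold (sentence : List (List Char)) :
    sentence.foldl recAStep (true, [])
      = (sentence.filter (fun l => l.length > 0)).foldl recAStep (true, []) := by
  rw [List.foldl_filter]
  apply PySem.List.foldl_congr_mem
  intro st l _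
  by_cases h : l.length > 0 <;> simp [recAStep, h]

-- A's loop over nonempty lines is the left fold of glue
theorem loopAB (parts : List (List Char)) (hall : ∀ l ∈ parts, l ≠ [])
    (acc : List Char) (hacc : acc ≠ []) :
    (parts.foldl recAStep (PySem.Chars.endswith acc [' '], acc)).2
      = parts.foldl recBGlue acc := by
  induction parts generalizing acc with
  | nil => rfl
  | cons q qs ih =>
    have hq : q ≠ [] := hall q (by simp)
    have hqlen : q.length > 0 := List.length_pos_iff.mpr hq
    simp only [List.foldl_cons]
    rw [show recAStep (PySem.Chars.endswith acc [' '], acc) q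
        = (PySem.Chars.endswith (recBGlue acc q) [' '], recBGlue acc q) from ?_]
    · exact ih (fun l hl => hall l (by simp [hl])) (recBGlue acc q) (glue_ne_nil acc q hacc)
    · simp only [recAStep, recBGlue, if_pos hqlen, sws_eq q hq, ews_eq q hq]
      have e1 := ews_append acc q hq
      have e2 : PySem.Chars.endswith (acc ++ ' ' :: q) [' '] = PySem.Chars.endswith q [' '] := by
        rw [show acc ++ ' ' :: q = (acc ++ [' ']) ++ q by simp]
        exact ews_append _ q hq
      by_cases h1 : PySem.Chars.endswith acc [' '] = true <;>
        by_cases h2 : PySem.Chars.startswith q [' '] = true <;>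
          simp [h1, h2, e1, e2]

-- ===== VERDICT (by name: the statement is the Claim_ definition above) =====
theorem recollage_sentence_spec : Claim_equal_recollage_sentence := by
  intro sentence _
  unfold Spec_recollage_sentence recollage_sentence recollage_sentence_alt
  rw [filter_fold]
  cases hf : (sentence.map String.toList).filter (fun l => l.length > 0) with
  | nil => rfl
  | cons p rest =>
    have hall : ∀ l ∈ p :: rest, l ≠ [] := by
      intro l hl
      have := List.of_mem_filter (hf ▸ hl)
      simp at this
      exact List.ne_nil_of_length_pos (by omega)
    have hp : p ≠ [] := hall p (by simp)
    have hplen : p.length > 0 := List.length_pos_iff.mpr hp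
    simp only [List.foldl_cons]
    rw [show recAStep (true, []) p = (PySem.Chars.endswith p [' '], p) from by
      simp [recAStep, hplen, ews_eq p hp]]
    rw [loopAB rest (fun l hl => hall l (by simp [hl])) p hp,
        reduce_eq_fg (p :: rest) hall]
    rfl
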